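-- pv_equiv track=rewrite | github.com/dihuang20/ICL_MSC_Project | data_processing/fetching_init_bigvul_dataset(optional)/patch_processor.py | merge_revisions_helper
-- ===== SOURCE A (Python) =====
-- def custom_join(lines_list):
--     res = ''
--     for line in lines_list:
--         line = line.strip()
--         if not line: continue
--         res += line
--         if not line.endswith(';') and not line.endswith('}'):
--             res += ' '
--     return res
--
-- def merge_revisions_helper(lines_list):
--     def adding_revisions_to_new_list(revisions, sign, new_lines_list):
--         revisions_str = custom_join(revisions).strip()
--         if revisions_str: new_lines_list.append(f'{sign}{{{revisions_str}}}')
--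
--     new_lines_list = []
--     i = 0
--     while i < len(lines_list):
--         if lines_list[i].startswith('+'):
--             revisions = []
--             while i < len(lines_list) and lines_list[i].startswith('+'):
--                 line = lines_list[i][1:].strip()
--                 if line: revisions.append(line)
--                 i += 1
--             if revisions: adding_revisions_to_new_list(revisions, '+', new_lines_list)
--             continue
--
--         if lines_list[i].startswith('-'):
--             revisions = []
--             while i < len(lines_list) and lines_list[i].startswith('-'):
--                 line = lines_list[i][1:].strip()
--                 if line: revisions.append(line)
--                 i += 1
--             if revisions: adding_revisions_to_new_list(revisions, '-', new_lines_list)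
--             continue
--
--         line = lines_list[i].strip()
--         if line: new_lines_list.append(line)
--         i += 1
--
--     return new_lines_list
-- ===== SOURCE B (Python) =====
-- def custom_join(lines_list):
--     res = ''
--     for line in lines_list:
--         line = line.strip()
--         if not line: continue
--         res += line
--         if not line.endswith(';') and not line.endswith('}'):
--             res += ' '
--     return res
--
-- def merge_revisions_helper(lines_list):
--     # one pass with a (sign, pending-revisions) accumulator, flushed on key change
--     out = []
--     sign = None
--     revs = []
--     def flush():
--         nonlocal sign, revs
--         if sign is not None:
--             s = custom_join(revs).strip()
--             if s:
--                 out.append(sign + '{' + s + '}')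
--         sign = None
--         revs = []
--     for line in lines_list:
--         if line.startswith('+'):
--             key = '+'
--         elif line.startswith('-'):
--             key = '-'
--         else:
--             key = None
--         if key is None:
--             flush()
--             t = line.strip()
--             if t:
--                 out.append(t)
--         else:
--             if sign != key:
--                 flush()
--                 sign = key
--             t = line[1:].strip()
--             if t:
--                 revs.append(t)
--     flush()
--     return out
-- ===== Notes on version B (the rewrite author's own statement) =====
-- stated objective: simpler
-- what changed: Replaces A's nested index-driven while loops (an outer scan with two inner run-consuming loops) by a single left fold over the lines with a (pending sign, pending revisions) accumulator that is flushed whenever the sign key changes.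
import Mathlib
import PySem

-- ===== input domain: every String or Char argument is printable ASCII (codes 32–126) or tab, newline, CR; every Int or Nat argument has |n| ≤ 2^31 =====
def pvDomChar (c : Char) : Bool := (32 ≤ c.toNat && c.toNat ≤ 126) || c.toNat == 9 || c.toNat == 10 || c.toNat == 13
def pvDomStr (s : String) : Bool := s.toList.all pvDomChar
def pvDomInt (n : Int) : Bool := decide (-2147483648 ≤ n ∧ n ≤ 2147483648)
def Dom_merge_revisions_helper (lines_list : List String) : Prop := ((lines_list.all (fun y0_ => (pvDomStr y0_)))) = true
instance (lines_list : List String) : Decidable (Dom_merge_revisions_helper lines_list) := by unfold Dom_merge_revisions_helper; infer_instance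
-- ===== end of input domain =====

-- B replaces A's nested index-driven while loops by a single left fold over the lines with a
-- (pending sign, pending revisions) accumulator flushed on key change (objective: simpler, one pass).

-- ===== PORT A =====
-- shared helper custom_join (identical in both Pythons)
def customJoin (lines_list : List String) : String :=
  lines_list.foldl (fun res line =>
    let line := PySem.Str.strip line
    if line = "" then res
    else
      let res := res ++ line
      if ¬ PySem.Str.endswith line ";" ∧ ¬ PySem.Str.endswith line "}" then res ++ " " else res) ""

-- A's local adding_revisions_to_new_list (returns the updated list instead of mutating)
def addingRevisions (revisions : List String) (sign : String) (new_lines_list : List String) : List String :=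
  let revisions_str := PySem.Str.strip (customJoin revisions)
  if revisions_str ≠ "" then new_lines_list ++ [sign ++ "{" ++ revisions_str ++ "}"] else new_lines_list

-- A's inner `while i < len(lines_list) and lines_list[i].startswith(sign)` loop: (revisions, rest)
def collectRun (sign : String) : List String → List String × List String
  | [] => ([], [])
  | l :: rest =>
    if PySem.Str.startswith l sign then
      let line := PySem.Str.strip (PySem.Str.slice l (some 1) none)
      let p := collectRun sign rest
      ((if line ≠ "" then line :: p.1 else p.1), p.2)
    else ([], l :: rest)

theorem collectRun_len (sign : String) (ls : List String) :
    (collectRun sign ls).2.length ≤ ls.length := by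
  induction ls with
  | nil => simp [collectRun]
  | cons l rest ih =>
    simp only [collectRun]
    split
    · simpa using Nat.le_succ_of_le ih
    · simp

theorem collectRun_cons_pos (sign l : String) (rest : List String)
    (h : PySem.Str.startswith l sign = true) :
    collectRun sign (l :: rest) =
      ((if PySem.Str.strip (PySem.Str.slice l (some 1) none) ≠ "" then
          PySem.Str.strip (PySem.Str.slice l (some 1) none) :: (collectRun sign rest).1
        else (collectRun sign rest).1), (collectRun sign rest).2) := by
  simp at h
  simp [collectRun, h]

-- A's outer while loop
def goA (lines_list : List String) (new_lines_list : List String) : List String :=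
  match lines_list with
  | [] => new_lines_list
  | l :: rest =>
    if h1 : PySem.Str.startswith l "+" then
      let p := collectRun "+" (l :: rest)
      goA p.2 (if p.1 ≠ [] then addingRevisions p.1 "+" new_lines_list else new_lines_list)
    else if h2 : PySem.Str.startswith l "-" then
      let p := collectRun "-" (l :: rest)
      goA p.2 (if p.1 ≠ [] then addingRevisions p.1 "-" new_lines_list else new_lines_list)
    else
      let line := PySem.Str.strip l
      goA rest (if line ≠ "" then new_lines_list ++ [line] else new_lines_list)
termination_by lines_list.length
decreasing_by
  · simp only [collectRun_cons_pos _ _ _ h1]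
    exact Nat.lt_succ_of_le (collectRun_len _ _)
  · simp only [collectRun_cons_pos _ _ _ h2]
    exact Nat.lt_succ_of_le (collectRun_len _ _)
  · simp

def merge_revisions_helper (lines_list : List String) : List String :=
  goA lines_list []

-- ===== PORT B =====
-- B's flush(): emits the pending group
def flushB (out : List String) (sign? : Option String) (revs : List String) : List String :=
  match sign? with
  | none => out
  | some sign =>
    let s := PySem.Str.strip (customJoin revs)
    if s ≠ "" then out ++ [sign ++ "{" ++ s ++ "}"] else out

-- B's loop body over one line; state = (out, sign, revs)
def stepB (st : List String × Option String × List String) (line : String) :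
    List String × Option String × List String :=
  let key : Option String :=
    if PySem.Str.startswith line "+" then some "+"
    else if PySem.Str.startswith line "-" then some "-" else none
  match key with
  | none =>
    let out := flushB st.1 st.2.1 st.2.2
    let t := PySem.Str.strip line
    ((if t ≠ "" then out ++ [t] else out), none, [])
  | some k =>
    let st2 := if st.2.1 ≠ some k then (flushB st.1 st.2.1 st.2.2, some k, ([] : List String))
               else st
    let t := PySem.Str.strip (PySem.Str.slice line (some 1) none)
    (st2.1, st2.2.1, (if t ≠ "" then st2.2.2 ++ [t] else st2.2.2))

def merge_revisions_helper_alt (lines_list : List String) : List String :=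
  let st := lines_list.foldl stepB ([], none, [])
  flushB st.1 st.2.1 st.2.2

-- ===== PRECONDITION & SPEC =====
def Spec_merge_revisions_helper (lines_list : List String) (out : List String) : Prop := out = merge_revisions_helper_alt lines_list
instance (lines_list : List String) (out : List String) : Decidable (Spec_merge_revisions_helper lines_list out) := by unfold Spec_merge_revisions_helper; infer_instance

-- ===== CLAIM (what is proved, stated in full; the proofs are below) =====
def Claim_equal_merge_revisions_helper : Prop := ∀ (lines_list : List String), Dom_merge_revisions_helper lines_list → Spec_merge_revisions_helper lines_list (merge_revisions_helper lines_list)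

-- ===== LEMMAS AND PROOFS =====

def flushB' (st : List String × Option String × List String) : List String :=
  flushB st.1 st.2.1 st.2.2

theorem not_startswith_both (l : String) (h : PySem.Str.startswith l "-" = true) :
    PySem.Str.startswith l "+" = false := by
  by_contra hp
  simp only [Bool.not_eq_false] at hp
  rw [PySem.Str.startswith_eq, PySem.Chars.startswith_iff] at h hp
  obtain ⟨t1, h1⟩ := h
  obtain ⟨t2, h2⟩ := hp
  rw [← h1] at h2
  simp at h2

theorem addingRevisions_nil (s : String) (out : List String) :
    addingRevisions [] s out = out := by
  have h : PySem.Str.strip (customJoin []) = "" := by decide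
  simp [addingRevisions, h]

theorem collectRun_rem (s : String) (ls : List String) :
    (collectRun s ls).2 = [] ∨
      ∃ r t, (collectRun s ls).2 = r :: t ∧ PySem.Str.startswith r s = false := by
  induction ls with
  | nil => left; rfl
  | cons l rest ih =>
    by_cases h : PySem.Str.startswith l s = true
    · rw [collectRun_cons_pos s l rest h]; exact ih
    · simp only [Bool.not_eq_true] at h
      refine ⟨l, rest, ?_, h⟩ |> Or.inr
      have h' := h
      simp at h'
      simp [collectRun, h']

-- while the state's sign matches the run, stepB only accumulates revisions (mirrors collectRun)
theorem foldl_run (s : String) (hs : s = "+" ∨ s = "-") (ls : List String) :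
    ∀ (out revs : List String),
      List.foldl stepB (out, some s, revs) ls =
        List.foldl stepB (out, some s, revs ++ (collectRun s ls).1) (collectRun s ls).2 := by
  induction ls with
  | nil => intro out revs; simp [collectRun]
  | cons l rest ih =>
    intro out revs
    by_cases h : PySem.Str.startswith l s = true
    · have hkey : (if PySem.Str.startswith l "+" then some "+"
          else if PySem.Str.startswith l "-" then some "-" else none) = some s := by
        rcases hs with rfl | rfl
        · have h' := h; simp at h'; simp [h']
        · have hnp := not_startswith_both l h
          have h' := h
          simp at h' hnp
          simp [h', hnp]
      have hstep : stepB (out, some s, revs) l =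
          (out, some s, (if PySem.Str.strip (PySem.Str.slice l (some 1) none) ≠ "" then
            revs ++ [PySem.Str.strip (PySem.Str.slice l (some 1) none)] else revs)) := by
        simp only [stepB, hkey]
        simp
      rw [List.foldl_cons, hstep, ih, collectRun_cons_pos s l rest h]
      split <;> simp
    · simp only [Bool.not_eq_true] at h
      have h' := h; simp at h'
      simp [collectRun, h']

-- once the run ends, flushing the pending group now or at the next step agree
theorem handover (s : String) (hs : s = "+" ∨ s = "-") (ls : List String)
    (hh : ls = [] ∨ ∃ r t, ls = r :: t ∧ PySem.Str.startswith r s = false)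
    (out revs : List String) :
    flushB' (List.foldl stepB (out, some s, revs) ls) =
      flushB' (List.foldl stepB (addingRevisions revs s out, none, []) ls) := by
  rcases hh with rfl | ⟨r, t, rfl, hr⟩
  · simp [flushB', flushB, addingRevisions]
  · have hstep : stepB (out, some s, revs) r = stepB (addingRevisions revs s out, none, []) r := by
      by_cases hp : PySem.Str.startswith r "+" = true
      · have hsm : s = "-" := by
          rcases hs with rfl | rfl
          · rw [hp] at hr; exact absurd hr (by simp)
          · rfl
        subst hsm
        simp at hp
        simp [stepB, hp, flushB, addingRevisions]
      · simp only [Bool.not_eq_true] at hp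
        by_cases hm : PySem.Str.startswith r "-" = true
        · have hsp : s = "+" := by
            rcases hs with rfl | rfl
            · rfl
            · rw [hm] at hr; exact absurd hr (by simp)
          subst hsp
          simp at hp hm
          simp [stepB, hp, hm, flushB, addingRevisions]
        · simp only [Bool.not_eq_true] at hm
          simp at hp hm
          simp [stepB, hp, hm, flushB, addingRevisions]
    rw [List.foldl_cons, List.foldl_cons, hstep]

theorem main_inv (n : Nat) : ∀ (ls : List String), ls.length ≤ n → ∀ (out : List String),
    flushB' (List.foldl stepB (out, none, []) ls) = goA ls out := by
  induction n with
  | zero =>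
    intro ls hls out
    have h0 : ls = [] := List.eq_nil_of_length_eq_zero (Nat.le_zero.mp hls)
    subst h0
    simp [flushB', flushB, goA]
  | succ n ih =>
    intro ls hls out
    match ls with
    | [] => simp [flushB', flushB, goA]
    | l :: rest =>
      have hrest : rest.length ≤ n := by simpa using Nat.succ_le_succ_iff.mp hls
      by_cases hp : PySem.Str.startswith l "+" = true
      · have hstep : stepB (out, none, []) l =
            (out, some "+", (if PySem.Str.strip (PySem.Str.slice l (some 1) none) ≠ "" then
              [PySem.Str.strip (PySem.Str.slice l (some 1) none)] else [])) := by
          have hp' := hp; simp at hp'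
          simp [stepB, hp', flushB]
        rw [List.foldl_cons, hstep, foldl_run "+" (Or.inl rfl) rest,
          handover "+" (Or.inl rfl) _ (collectRun_rem "+" rest),
          ih _ (le_trans (collectRun_len "+" rest) hrest)]
        conv_rhs => rw [goA.eq_def]
        simp only [dif_pos hp]
        rw [collectRun_cons_pos "+" l rest hp]
        by_cases ht : PySem.Str.strip (PySem.Str.slice l (some 1) none) = ""
        · simp only [ht, ne_eq, not_true_eq_false, if_false, List.nil_append]
          by_cases hr1 : (collectRun "+" rest).1 = []
          · simp [hr1, addingRevisions_nil]
          · simp [hr1]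
        · simp [ht]
      · simp only [Bool.not_eq_true] at hp
        by_cases hm : PySem.Str.startswith l "-" = true
        · have hstep : stepB (out, none, []) l =
              (out, some "-", (if PySem.Str.strip (PySem.Str.slice l (some 1) none) ≠ "" then
                [PySem.Str.strip (PySem.Str.slice l (some 1) none)] else [])) := by
            have hp' := hp; have hm' := hm
            simp at hp' hm'
            simp [stepB, hp', hm', flushB]
          rw [List.foldl_cons, hstep, foldl_run "-" (Or.inr rfl) rest,
            handover "-" (Or.inr rfl) _ (collectRun_rem "-" rest),
            ih _ (le_trans (collectRun_len "-" rest) hrest)]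
          conv_rhs => rw [goA.eq_def]
          simp only [hp, Bool.false_eq_true, dite_false, dif_pos hm]
          rw [collectRun_cons_pos "-" l rest hm]
          by_cases ht : PySem.Str.strip (PySem.Str.slice l (some 1) none) = ""
          · simp only [ht, ne_eq, not_true_eq_false, if_false, List.nil_append]
            by_cases hr1 : (collectRun "-" rest).1 = []
            · simp [hr1, addingRevisions_nil]
            · simp [hr1]
          · simp [ht]
        · simp only [Bool.not_eq_true] at hm
          have hstep : stepB (out, none, []) l =
              ((if PySem.Str.strip l ≠ "" then out ++ [PySem.Str.strip l] else out), none, []) := by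
            have hp' := hp; have hm' := hm
            simp at hp' hm'
            simp [stepB, hp', hm', flushB]
          rw [List.foldl_cons, hstep, ih _ hrest]
          conv_rhs => rw [goA.eq_def]
          simp only [hp, hm, Bool.false_eq_true, dite_false]

-- ===== VERDICT (by name: the statement is the Claim_ definition above) =====
theorem merge_revisions_helper_spec : Claim_equal_merge_revisions_helper := by
  intro ls _
  unfold Spec_merge_revisions_helper merge_revisions_helper merge_revisions_helper_alt
  exact (main_inv ls.length ls le_rfl []).symm
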